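-- pv_equiv track=rewrite | github.com/IssacAX123/leetcode_solutions | 506. Relative Ranks.py | findRelativeRanks_issac
-- ===== SOURCE A (Python) =====
-- from typing import List
--
-- def findRelativeRanks_issac(score: List[int]) -> List[str]:
--     my_dict = {i+1: 0 for i in score}
--     new_array = sorted(score, reverse=True)
--     result = []
--     for i, key in enumerate(new_array):
--         val = ""
--         if i == 0:
--             val = "Gold Medal"
--         elif i == 1:
--             val = "Silver Medal"
--         elif i == 2:
--             val = "Bronze Medal"
--         else:
--             val = str(i+1)
--
--         my_dict[key] = val
--
--     for val in score:
--         result.append(my_dict[val])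
--
--     return result
-- ===== SOURCE B (Python) =====
-- from typing import List
--
-- def findRelativeRanks_issac(score: List[int]) -> List[str]:
--     # No sort, no dict: the rank index of s is (#scores >= s) - 1, computed by a direct count;
--     # the three medals come from a lookup table instead of an if/elif chain.
--     medals = ["Gold Medal", "Silver Medal", "Bronze Medal"]
--     result = []
--     for s in score:
--         i = sum(1 for x in score if x >= s) - 1
--         result.append(medals[i] if i < 3 else str(i + 1))
--     return result
-- ===== Notes on version B (the rewrite author's own statement) =====
-- stated objective: alternative
-- what changed: Replaced the sort + value-keyed dict (last write wins on duplicates) by a sort-free single pass that computes each score's rank directly as (#scores >= s) - 1 by counting over the list.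
import Mathlib
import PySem

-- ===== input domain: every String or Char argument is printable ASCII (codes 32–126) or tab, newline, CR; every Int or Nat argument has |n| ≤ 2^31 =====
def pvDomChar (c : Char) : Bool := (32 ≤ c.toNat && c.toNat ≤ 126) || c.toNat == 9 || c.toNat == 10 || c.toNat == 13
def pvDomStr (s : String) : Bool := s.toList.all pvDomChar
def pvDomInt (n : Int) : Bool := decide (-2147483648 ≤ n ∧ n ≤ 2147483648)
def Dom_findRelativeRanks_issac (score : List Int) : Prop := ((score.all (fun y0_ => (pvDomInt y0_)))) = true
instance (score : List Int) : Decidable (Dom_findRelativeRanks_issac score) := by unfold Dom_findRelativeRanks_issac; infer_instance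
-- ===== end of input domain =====

-- B replaces A's sort + value-keyed dict by a sort-free direct count (#scores >= s) - 1 per element; alternative decomposition, same return value.

-- ===== PORT A =====
-- the 'val' if/elif chain of A's first loop (i == 0/1/2, else str(i+1))
def medalA (i : Int) : String :=
  if i = 0 then "Gold Medal"
  else if i = 1 then "Silver Medal"
  else if i = 2 then "Bronze Medal"
  else PySem.Int.toStr (i + 1)

def findRelativeRanks_issac (score : List Int) : List String :=
  -- {i+1: 0 for i in score}: the int values 0 are never read (every key looked up below
  -- is a score value and is overwritten in the enumerate loop), so they port as ""
  let myDict : PySem.Dict Int String :=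
    score.foldl (fun d i => d.insert (i + 1) "") PySem.Dict.empty
  let newArray := PySem.List.sorted score (fun x => x) true
  let myDict := (PySem.List.enumerate newArray).foldl
    (fun d p => d.insert p.2 (medalA p.1)) myDict
  -- my_dict[val]: the key is always present (written in the enumerate loop), so the
  -- KeyError branch of get? is unreachable and getD "" is exact
  score.foldl (fun result v => result ++ [(myDict.get? v).getD ""]) []

-- ===== PORT B =====
def findRelativeRanks_issac_alt (score : List Int) : List String :=
  let medals : List String := ["Gold Medal", "Silver Medal", "Bronze Medal"]
  score.foldl (fun result s =>
    -- sum(1 for x in score if x >= s) is the count of elements ≥ s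
    let i : Int := ((score.countP (fun x => decide (s ≤ x)) : Nat) : Int) - 1
    -- medals[i]: here 0 ≤ i < 3, so the index is in range and pyGetD "" is exact
    result ++ [if i < 3 then PySem.List.pyGetD medals i "" else PySem.Int.toStr (i + 1)]) []

-- ===== PRECONDITION & SPEC =====
def Spec_findRelativeRanks_issac (score : List Int) (out : List String) : Prop := out = findRelativeRanks_issac_alt score
instance (score : List Int) (out : List String) : Decidable (Spec_findRelativeRanks_issac score out) := by unfold Spec_findRelativeRanks_issac; infer_instance

-- ===== CLAIM (what is proved, stated in full; the proofs are below) =====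
def Claim_equal_findRelativeRanks_issac : Prop := ∀ (score : List Int), Dom_findRelativeRanks_issac score → Spec_findRelativeRanks_issac score (findRelativeRanks_issac score)

-- ===== LEMMAS AND PROOFS =====

-- After A's enumerate loop over a descending list t (offset s), the dict maps any v ∈ t
-- to the label of the LAST index holding v, which is s + #{x ∈ t | x ≥ v} - 1.
theorem dict_after_loop (t : List Int) (s : Int) (d : PySem.Dict Int String) (v : Int)
    (hp : t.Pairwise (fun a b => b ≤ a)) :
    ((PySem.List.enumerate t s).foldl (fun d p => d.insert p.2 (medalA p.1)) d).get? v =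
      if v ∈ t then some (medalA (s + ((t.countP (fun x => decide (v ≤ x)) : Nat) : Int) - 1))
      else d.get? v := by
  induction t generalizing s d with
  | nil => simp [PySem.List.enumerate_nil]
  | cons k t ih =>
    rw [PySem.List.enumerate_cons]
    simp only [List.foldl_cons]
    rw [ih (s + 1) _ hp.of_cons]
    rcases List.pairwise_cons.mp hp with ⟨hk, _⟩
    by_cases hvt : v ∈ t
    · have hvk : v ≤ k := hk v hvt
      have hc : (k :: t).countP (fun x => decide (v ≤ x)) =
          t.countP (fun x => decide (v ≤ x)) + 1 := by
        simp [hvk]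
      simp only [hvt, if_true, List.mem_cons, or_true, hc]
      congr 2
      push_cast
      ring
    · by_cases hvk : v = k
      · subst hvk
        have hc0 : t.countP (fun x => decide (v ≤ x)) = 0 := by
          rw [List.countP_eq_zero]
          intro x hx
          have hxk : x ≤ v := hk x hx
          have : x ≠ v := fun h => hvt (h ▸ hx)
          simp only [decide_eq_true_eq]
          omega
        simp [hvt, hc0, PySem.Dict.get?_insert_self]
      · simp [hvt, hvk, PySem.Dict.get?_insert_of_ne _ _ hvk]

-- A's chain label at a nonnegative index equals B's table lookup / str fallback.
theorem medalA_eq_table (i : Int) (h : 0 ≤ i) :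
    medalA i = (if i < 3 then PySem.List.pyGetD ["Gold Medal", "Silver Medal", "Bronze Medal"] i ""
                else PySem.Int.toStr (i + 1)) := by
  by_cases h0 : i = 0
  · subst h0; decide
  · by_cases h1 : i = 1
    · subst h1; decide
    · by_cases h2 : i = 2
      · subst h2; decide
      · have h3 : ¬ i < 3 := by omega
        simp [medalA, h0, h1, h2, h3]

-- A's per-element lookup equals B's direct count, for v a member of score.
theorem lookup_eq_count (score : List Int) (v : Int) (hv : v ∈ score) :
    ((((PySem.List.enumerate (PySem.List.sorted score (fun x => x) true) 0).foldl
        (fun d p => d.insert p.2 (medalA p.1))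
        (score.foldl (fun d i => d.insert (i + 1) "") PySem.Dict.empty)).get? v).getD "")
      = (if (((score.countP (fun x => decide (v ≤ x)) : Nat) : Int) - 1) < 3
         then PySem.List.pyGetD ["Gold Medal", "Silver Medal", "Bronze Medal"]
                (((score.countP (fun x => decide (v ≤ x)) : Nat) : Int) - 1) ""
         else PySem.Int.toStr ((((score.countP (fun x => decide (v ≤ x)) : Nat) : Int) - 1) + 1)) := by
  have hperm := PySem.List.sorted_perm score (fun x => x) true
  have hmem : v ∈ PySem.List.sorted score (fun x => x) true := hperm.mem_iff.mpr hv
  have hpair := PySem.List.sorted_pairwise_rev score (fun x => x)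
  rw [dict_after_loop _ 0 _ v hpair]
  simp only [hmem, if_true, Option.getD_some]
  have hcnt : (PySem.List.sorted score (fun x => x) true).countP (fun x => decide (v ≤ x))
      = score.countP (fun x => decide (v ≤ x)) := hperm.countP_eq _
  rw [hcnt]
  have hpos : 0 < score.countP (fun x => decide (v ≤ x)) :=
    List.countP_pos_iff.mpr ⟨v, hv, by simp⟩
  rw [show (0 : Int) + ((score.countP (fun x => decide (v ≤ x)) : Nat) : Int) - 1
        = ((score.countP (fun x => decide (v ≤ x)) : Nat) : Int) - 1 by ring]
  exact medalA_eq_table _ (by omega)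

-- ===== VERDICT (by name: the statement is the Claim_ definition above) =====
theorem findRelativeRanks_issac_spec : Claim_equal_findRelativeRanks_issac := by
  intro score _
  unfold Spec_findRelativeRanks_issac findRelativeRanks_issac findRelativeRanks_issac_alt
  rw [PySem.List.foldl_append_singleton_eq_map, PySem.List.foldl_append_singleton_eq_map]
  exact List.map_congr_left (fun v hv => lookup_eq_count score v hv)
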